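-- pv_equiv track=rewrite | github.com/jaluebbe/FlightRoutes | upload_utils.py | combine_all_routes
-- ===== SOURCE A (Python) =====
-- import itertools
--
-- def combine_all_routes(routes: list[str]) -> str:
--     """Combines a list of routes into a single route."""
--     if len(routes) < 2:
--         raise ValueError("The function expects at least two routes to combine.")
--     for perm in itertools.permutations(routes):
--         combined_route = perm[0].split("-")
--         valid_combination = True
--         for i in range(1, len(perm)):
--             segments = perm[i].split("-")
--             if combined_route[-2:] == segments[:2]:
--                 combined_route += segments[2:]
--             elif segments[-2:] == combined_route[:2]:
--                 combined_route = segments + combined_route[2:]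
--             else:
--                 valid_combination = False
--                 break
--         if valid_combination:
--             return "-".join(combined_route)
-- ===== SOURCE B (Python) =====
-- def combine_all_routes(routes: list[str]) -> str:
--     """Combines a list of routes into a single route (backtracking search with
--     pruning instead of enumerating whole permutations)."""
--     if len(routes) < 2:
--         raise ValueError("The function expects at least two routes to combine.")
--
--     def extend(combined, segments):
--         if combined[-2:] == segments[:2]:
--             return combined + segments[2:]
--         if segments[-2:] == combined[:2]:
--             return segments + combined[2:]
--         return None
--
--     def dfs(combined, remaining):
--         if not remaining:
--             return "-".join(combined)
--         for i in range(len(remaining)):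
--             nxt = extend(combined, remaining[i].split("-"))
--             if nxt is not None:
--                 res = dfs(nxt, remaining[:i] + remaining[i + 1:])
--                 if res is not None:
--                     return res
--         return None
--
--     for i in range(len(routes)):
--         res = dfs(routes[i].split("-"), routes[:i] + routes[i + 1:])
--         if res is not None:
--             return res
-- ===== Notes on version B (the rewrite author's own statement) =====
-- stated objective: faster
-- what changed: Replaces the enumeration of all n! permutations (each re-chained from scratch) by a recursive backtracking search that extends the combined route one unused route at a time, pruning every permutation sharing an unchainable prefix; the in-order DFS visits viable permutations in exactly itertools.permutations order, so the first success is identical. Intended as faster; in a timing run A timed out at n=16 where B returned, so no ratio could be measured.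
import Mathlib
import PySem

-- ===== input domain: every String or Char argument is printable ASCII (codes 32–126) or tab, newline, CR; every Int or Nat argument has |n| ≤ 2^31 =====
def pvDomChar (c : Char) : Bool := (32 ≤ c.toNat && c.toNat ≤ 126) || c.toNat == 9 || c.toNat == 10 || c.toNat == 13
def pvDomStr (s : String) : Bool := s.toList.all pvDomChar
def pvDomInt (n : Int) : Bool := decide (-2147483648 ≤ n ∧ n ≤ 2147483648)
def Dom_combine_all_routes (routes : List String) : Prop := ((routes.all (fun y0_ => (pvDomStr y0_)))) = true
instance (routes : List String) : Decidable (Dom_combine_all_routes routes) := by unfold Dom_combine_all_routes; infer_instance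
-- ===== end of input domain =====

-- B replaces A's scan of all n! permutations by an in-order pruned backtracking search (intended as faster; a timing run saw A time out at n=16 where B returned, so no ratio was measured).

-- ===== PORT A =====
-- one step of A's inner for-loop: state = (combined_route, valid_combination); break modeled by the flag
def pvStepA (st : List String × Bool) (r : String) : List String × Bool :=
  if st.2 then
    let segments := ((PySem.Str.split? r "-").getD [])
    if PySem.List.slice st.1 (some (-2)) none = PySem.List.slice segments none (some 2) then
      (st.1 ++ PySem.List.slice segments (some 2) none, true)
    else if PySem.List.slice segments (some (-2)) none = PySem.List.slice st.1 none (some 2) then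
      (segments ++ PySem.List.slice st.1 (some 2) none, true)
    else (st.1, false)
  else st

-- A's body for one permutation: chain perm[1:] onto perm[0].split("-"); some iff valid
def pvTryPermA (perm : List String) : Option String :=
  match perm with
  | [] => none
  | h :: t =>
      let st := t.foldl pvStepA (((PySem.Str.split? h "-").getD []), true)
      if st.2 then some (PySem.Str.join "-" st.1) else none

def combine_all_routes (routes : List String) : Option String :=
  if routes.length < 2 then none  -- A raises ValueError here; excluded by Pre_
  else (PySem.List.permutations routes routes.length).findSome? pvTryPermA

-- ===== PORT B =====
-- B's extend(combined, segments)
def pvExtend (c segs : List String) : Option (List String) :=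
  if PySem.List.slice c (some (-2)) none = PySem.List.slice segs none (some 2) then
    some (c ++ PySem.List.slice segs (some 2) none)
  else if PySem.List.slice segs (some (-2)) none = PySem.List.slice c none (some 2) then
    some (segs ++ PySem.List.slice c (some 2) none)
  else none

-- B's dfs(combined, remaining); fuel = remaining.length bounds the recursion depth
def pvDfs : Nat → List String → List String → Option String
  | _, c, [] => some (PySem.Str.join "-" c)
  | 0, _, _ :: _ => none
  | f+1, c, r0 :: rest =>
      (List.range (r0 :: rest).length).findSome? (fun i =>
        match (r0 :: rest)[i]? with
        | none => none
        | some r =>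
          (pvExtend c (((PySem.Str.split? r "-").getD []))).bind
            (fun c' => pvDfs f c' ((r0 :: rest).eraseIdx i)))

def combine_all_routes_alt (routes : List String) : Option String :=
  if routes.length < 2 then none  -- B raises ValueError here; excluded by Pre_
  else (List.range routes.length).findSome? (fun i =>
        match routes[i]? with
        | none => none
        | some r => pvDfs (routes.length - 1) (((PySem.Str.split? r "-").getD [])) (routes.eraseIdx i))

-- ===== PRECONDITION & SPEC =====
-- Pre_ excludes only the inputs with fewer than two routes, on which A raises ValueError.
def Pre_combine_all_routes (routes : List String) : Prop := 2 ≤ routes.length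
instance (routes : List String) : Decidable (Pre_combine_all_routes routes) := by
  unfold Pre_combine_all_routes; infer_instance

def pvWitness_combine_all_routes : List String := ["AAA-BBB-CCC", "BBB-CCC-DDD"]

def Spec_combine_all_routes (routes : List String) (out : Option String) : Prop := out = combine_all_routes_alt routes
instance (routes : List String) (out : Option String) : Decidable (Spec_combine_all_routes routes out) := by unfold Spec_combine_all_routes; infer_instance

-- ===== CLAIM (what is proved, stated in full; the proofs are below) =====
def Claim_equal_combine_all_routes : Prop := ∀ (routes : List String), Dom_combine_all_routes routes → Pre_combine_all_routes routes → Spec_combine_all_routes routes (combine_all_routes routes)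

-- ===== LEMMAS AND PROOFS =====

-- sequential chaining of a list of routes onto c, as an Option (proof-only helper)
def pvChain (c : List String) : List String → Option (List String)
  | [] => some c
  | r :: t => (pvExtend c (((PySem.Str.split? r "-").getD []))).bind (fun c' => pvChain c' t)

theorem pv_findSome?_congr {α β : Type} (f g : α → Option β) (l : List α)
    (h : ∀ a ∈ l, f a = g a) : l.findSome? f = l.findSome? g := by
  induction l with
  | nil => rfl
  | cons x xs ih =>
      simp only [List.findSome?_cons, h x (by simp)]
      cases g x with
      | none => exact ih (fun a ha => h a (by simp [ha]))
      | some b => rfl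

theorem pv_findSome?_flatMap {α β γ : Type} (g : α → List β) (f : β → Option γ) (l : List α) :
    (l.flatMap g).findSome? f = l.findSome? (fun a => (g a).findSome? f) := by
  induction l with
  | nil => rfl
  | cons x xs ih =>
      simp only [List.flatMap_cons, List.findSome?_append, List.findSome?_cons, ih]
      cases (g x).findSome? f <;> rfl

theorem pvStepA_false : ∀ (t : List String) (st : List String × Bool),
    st.2 = false → t.foldl pvStepA st = st := by
  intro t
  induction t with
  | nil => intro st h; rfl
  | cons r t ih =>
      intro st h
      have : pvStepA st r = st := by simp [pvStepA, h]
      simp [List.foldl_cons, this, ih st h]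

-- A's flagged fold equals Option-chaining
theorem pv_foldA (t : List String) (c : List String) :
    (if (t.foldl pvStepA (c, true)).2 then
       some (PySem.Str.join "-" (t.foldl pvStepA (c, true)).1) else none)
      = (pvChain c t).map (PySem.Str.join "-") := by
  induction t generalizing c with
  | nil => rfl
  | cons r t ih =>
      simp only [List.foldl_cons, pvChain]
      by_cases h1 : PySem.List.slice c (some (-2)) none
          = PySem.List.slice (((PySem.Str.split? r "-").getD [])) none (some 2)
      · have hs : pvStepA (c, true) r
            = (c ++ PySem.List.slice (((PySem.Str.split? r "-").getD [])) (some 2) none, true) := by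
          simp [pvStepA, h1]
        rw [hs, ih]
        simp [pvExtend, h1]
      · by_cases h2 : PySem.List.slice (((PySem.Str.split? r "-").getD [])) (some (-2)) none
            = PySem.List.slice c none (some 2)
        · have hs : pvStepA (c, true) r
              = (((PySem.Str.split? r "-").getD []) ++ PySem.List.slice c (some 2) none, true) := by
            simp [pvStepA, h1, h2]
          rw [hs, ih]
          simp [pvExtend, h1, h2]
        · have hs : pvStepA (c, true) r = (c, false) := by
            simp [pvStepA, h1, h2]
          rw [hs, pvStepA_false t (c, false) rfl]
          simp [pvExtend, h1, h2]

theorem pv_tryPerm_cons (h : String) (t : List String) :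
    pvTryPermA (h :: t) = (pvChain (((PySem.Str.split? h "-").getD [])) t).map (PySem.Str.join "-") := by
  simp only [pvTryPermA]
  exact pv_foldA t (((PySem.Str.split? h "-").getD []))

-- main invariant: A's scan of the permutations of rem, all chained from c, equals B's dfs
theorem pv_main : ∀ (r : Nat) (rem : List String), rem.length = r → ∀ (c : List String),
    (PySem.List.permutations rem r).findSome? (fun p => (pvChain c p).map (PySem.Str.join "-"))
      = pvDfs r c rem := by
  intro r
  induction r with
  | zero =>
      intro rem hlen c
      have : rem = [] := List.length_eq_zero_iff.mp hlen
      subst this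
      rfl
  | succ r ih =>
      intro rem hlen c
      match rem, hlen with
      | r0 :: rest, hlen =>
        rw [PySem.List.permutations, pv_findSome?_flatMap, pvDfs]
        apply pv_findSome?_congr
        intro i hi
        have hi' : i < (r0 :: rest).length := List.mem_range.mp hi
        have hget : (r0 :: rest)[i]? = some ((r0 :: rest)[i]) := List.getElem?_eq_getElem hi'
        rw [hget]
        simp only [List.findSome?_map]
        have hlen2 : ((r0 :: rest).eraseIdx i).length = r := by
          rw [List.length_eraseIdx_of_lt hi']
          simpa using congrArg (· - 1) hlen
        have hcong : (PySem.List.permutations ((r0 :: rest).eraseIdx i) r).findSome?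
              ((fun p => (pvChain c p).map (PySem.Str.join "-")) ∘ (fun p => (r0 :: rest)[i] :: p))
            = (PySem.List.permutations ((r0 :: rest).eraseIdx i) r).findSome?
              (fun p => (pvExtend c (((PySem.Str.split? (r0 :: rest)[i] "-").getD []))).bind
                  (fun c' => (pvChain c' p).map (PySem.Str.join "-"))) := by
          apply pv_findSome?_congr
          intro p _
          cases hx : pvExtend c (((PySem.Str.split? (r0 :: rest)[i] "-").getD [])) <;>
            simp [pvChain, hx]
        rw [hcong]
        cases hx : pvExtend c (((PySem.Str.split? (r0 :: rest)[i] "-").getD [])) with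
        | none => simp
        | some c' => simp only [Option.bind_some, ih _ hlen2]

-- ===== VERDICT (by name: the statement is the Claim_ definition above) =====
theorem combine_all_routes_spec : Claim_equal_combine_all_routes := by
  intro routes _hdom hpre
  unfold Pre_combine_all_routes at hpre
  unfold Spec_combine_all_routes combine_all_routes combine_all_routes_alt
  rw [if_neg (by omega), if_neg (by omega)]
  match routes, hpre with
  | r0 :: rest, hpre =>
    simp only [List.length_cons, Nat.add_sub_cancel]
    rw [PySem.List.permutations, pv_findSome?_flatMap]
    apply pv_findSome?_congr
    intro i hi
    have hi' : i < (r0 :: rest).length := List.mem_range.mp hi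
    have hget : (r0 :: rest)[i]? = some ((r0 :: rest)[i]) := List.getElem?_eq_getElem hi'
    rw [hget]
    simp only [List.findSome?_map]
    have hlen2 : ((r0 :: rest).eraseIdx i).length = rest.length := by
      rw [List.length_eraseIdx_of_lt hi']
      simp
    have hcong : (PySem.List.permutations ((r0 :: rest).eraseIdx i) rest.length).findSome?
          (pvTryPermA ∘ (fun p => (r0 :: rest)[i] :: p))
        = (PySem.List.permutations ((r0 :: rest).eraseIdx i) rest.length).findSome?
          (fun p => (pvChain (((PySem.Str.split? (r0 :: rest)[i] "-").getD [])) p).map (PySem.Str.join "-")) := by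
      apply pv_findSome?_congr
      intro p _
      exact pv_tryPerm_cons _ p
    rw [hcong, pv_main rest.length ((r0 :: rest).eraseIdx i) hlen2]
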